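-- pv_equiv track=rewrite | github.com/madisonscott/advent-of-code | 2023/12.py | is_possible_arrangement
-- ===== SOURCE A (Python) =====
-- def is_possible_arrangement(possible_row, actual_broken_recs):
--     possible_groups = possible_row.split('.')
--     possible_incomplete_end = possible_row.endswith('#')
--     possible_broken_recs = [ len(g) for g in possible_groups if g ]
--
--     num_possible = len(possible_broken_recs)
--     if num_possible > len(actual_broken_recs):
--         return False
--
--     for i in range(num_possible):
--         possible = possible_broken_recs[i]
--         actual = actual_broken_recs[i]
--
--         if possible_incomplete_end and i == num_possible - 1 and possible < actual:
--             return True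
--         elif possible != actual:
--             return False
--
--     return True
-- ===== SOURCE B (Python) =====
-- def is_possible_arrangement(possible_row, actual_broken_recs):
--     # One fused pass: maintain the current run of non-'.' chars and an index
--     # into actual_broken_recs; close/compare runs on the fly.
--     n = len(actual_broken_recs)
--     run = 0
--     i = 0
--     for ch in possible_row:
--         if ch == '.':
--             if run != 0:
--                 if i >= n or run != actual_broken_recs[i]:
--                     return False
--                 i += 1
--                 run = 0
--         else:
--             run += 1
--     if run != 0:
--         if i >= n:
--             return False
--         if possible_row.endswith('#'):
--             return run <= actual_broken_recs[i]
--         return run == actual_broken_recs[i]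
--     return True
-- ===== Notes on version B (the rewrite author's own statement) =====
-- stated objective: alternative
-- what changed: B replaces A's split('.')-then-list-of-group-lengths-then-index-loop by a single fused pass over the characters that maintains the current run length and an index into actual_broken_recs, checking each group as it closes.
import Mathlib
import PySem

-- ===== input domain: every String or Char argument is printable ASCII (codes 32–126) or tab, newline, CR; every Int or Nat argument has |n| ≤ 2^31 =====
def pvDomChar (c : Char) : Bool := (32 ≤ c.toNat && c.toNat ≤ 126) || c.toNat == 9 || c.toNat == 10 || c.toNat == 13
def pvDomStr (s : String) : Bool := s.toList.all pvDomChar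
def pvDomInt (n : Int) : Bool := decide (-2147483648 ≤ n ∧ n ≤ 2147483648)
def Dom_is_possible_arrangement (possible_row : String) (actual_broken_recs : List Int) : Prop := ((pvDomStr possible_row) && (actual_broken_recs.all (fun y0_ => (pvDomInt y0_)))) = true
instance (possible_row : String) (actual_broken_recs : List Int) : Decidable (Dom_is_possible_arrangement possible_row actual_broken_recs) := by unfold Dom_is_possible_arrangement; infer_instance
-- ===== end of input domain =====

-- B replaces split('.')-then-index-loop by a single fused pass over the characters
-- (objective: alternative decomposition; same return value on every input).

-- ===== PORT A =====
-- the 'for i in range(num_possible)' loop with its early returns, as recursion on i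
def aLoop (pbr recs : List Int) (inc : Bool) (np : Nat) (i : Nat) : Bool :=
  if _h : i < np then
    -- A indexes pbr[i] and recs[i] only with i < np ≤ len recs, so getD is exact here
    let possible := pbr.getD i 0
    let actual := recs.getD i 0
    if inc ∧ i = np - 1 ∧ possible < actual then true
    else if possible ≠ actual then false
    else aLoop pbr recs inc np (i + 1)
  else true
  termination_by np - i

def is_possible_arrangement (possible_row : String) (actual_broken_recs : List Int) : Bool :=
  -- split('.') with a nonempty separator never fails, so split? is some; getD [] is exact
  let possible_groups := (PySem.Str.split? possible_row ".").getD []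
  let possible_incomplete_end := PySem.Str.endswith possible_row "#"
  let possible_broken_recs := (possible_groups.filter (fun g => g ≠ "")).map (fun g => PySem.Str.len g)
  let num_possible := possible_broken_recs.length
  if num_possible > actual_broken_recs.length then false
  else aLoop possible_broken_recs actual_broken_recs possible_incomplete_end num_possible 0

-- ===== PORT B =====
-- the 'for ch in possible_row' loop of Source B; none = an early 'return False'
def altLoop (recs : List Int) (n : Nat) : List Char → Nat → Nat → Option (Nat × Nat)
  | [], run, i => some (run, i)
  | c :: cs, run, i =>
    if c = '.' then
      if run ≠ 0 then
        if n ≤ i ∨ (run : Int) ≠ recs.getD i 0 then none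
        else altLoop recs n cs 0 (i + 1)
      else altLoop recs n cs run i
    else altLoop recs n cs (run + 1) i

def is_possible_arrangement_alt (possible_row : String) (actual_broken_recs : List Int) : Bool :=
  let n := actual_broken_recs.length
  match altLoop actual_broken_recs n possible_row.toList 0 0 with
  | none => false
  | some (run, i) =>
    if run ≠ 0 then
      if n ≤ i then false
      else if PySem.Str.endswith possible_row "#" then decide ((run : Int) ≤ actual_broken_recs.getD i 0)
      else decide ((run : Int) = actual_broken_recs.getD i 0)
    else true

-- ===== PRECONDITION & SPEC =====
def Spec_is_possible_arrangement (possible_row : String) (actual_broken_recs : List Int) (out : Bool) : Prop := out = is_possible_arrangement_alt possible_row actual_broken_recs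
instance (possible_row : String) (actual_broken_recs : List Int) (out : Bool) : Decidable (Spec_is_possible_arrangement possible_row actual_broken_recs out) := by unfold Spec_is_possible_arrangement; infer_instance

-- ===== CLAIM (what is proved, stated in full; the proofs are below) =====
def Claim_equal_is_possible_arrangement : Prop := ∀ (possible_row : String) (actual_broken_recs : List Int), Dom_is_possible_arrangement possible_row actual_broken_recs → Spec_is_possible_arrangement possible_row actual_broken_recs (is_possible_arrangement possible_row actual_broken_recs)

-- ===== LEMMAS AND PROOFS =====

-- reference form both ports are reduced to
def refAux (inc : Bool) : List Int → List Int → Bool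
  | [], _ => true
  | _ :: _, [] => false
  | p :: ps, a :: as =>
    if ps.isEmpty then (if inc then decide (p ≤ a) else decide (p = a))
    else decide (p = a) && refAux inc ps as

-- group lengths of the tail, given an open run of length `run`
def glen (run : Nat) : List Char → List Int
  | [] => if run = 0 then [] else [(run : Int)]
  | c :: cs => if c = '.' then (if run = 0 then [] else [(run : Int)]) ++ glen 0 cs
               else glen (run + 1) cs

-- simple split on '.' (what splitOn with sep = ['.'] computes)
def dsplit (cur : List Char) : List Char → List (List Char)
  | [] => [cur]
  | c :: cs => if c = '.' then cur :: dsplit [] cs else dsplit (cur ++ [c]) cs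

lemma splitOn_go_eq (fuel : Nat) (l cur acc) (h : l.length ≤ fuel) :
    PySem.Chars.splitOn.go ['.'] fuel l cur acc = acc.reverse ++ dsplit cur.reverse l := by
  induction fuel generalizing l cur acc with
  | zero =>
    have : l = [] := by cases l <;> simp_all
    subst this; simp [PySem.Chars.splitOn.go, dsplit]
  | succ fuel ih =>
    cases l with
    | nil => simp [PySem.Chars.splitOn.go, dsplit]
    | cons c cs =>
      by_cases hc : c = '.'
      · subst hc
        have hp : List.isPrefixOf ['.'] ('.' :: cs) = true := by simp [List.isPrefixOf]
        simp only [PySem.Chars.splitOn.go, hp]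
        rw [ih _ _ _ (by simpa using Nat.le_of_succ_le_succ (by simpa using h))]
        simp [dsplit]
      · have hp : List.isPrefixOf ['.'] (c :: cs) = false := by
          simp [List.isPrefixOf]; exact Ne.symm hc
        simp only [PySem.Chars.splitOn.go, hp, Bool.false_eq_true, if_false]
        rw [ih cs (c :: cur) acc (by simpa using Nat.le_of_succ_le_succ h)]
        simp [dsplit, hc]

lemma splitOn_eq_dsplit (s : List Char) : PySem.Chars.splitOn s ['.'] = dsplit [] s := by
  simpa using splitOn_go_eq (s.length + 1) s [] [] (by omega)

lemma glen_of_dsplit (cur : List Char) (s : List Char) :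
    ((dsplit cur s).filter (fun g => !g.isEmpty)).map (fun g => (g.length : Int)) = glen cur.length s := by
  induction s generalizing cur with
  | nil => cases cur <;> simp [dsplit, glen]
  | cons c cs ih =>
    by_cases hc : c = '.'
    · subst hc
      have h0 := ih []
      cases cur <;> simp [dsplit, glen] <;> simpa using h0
    · have := ih (cur ++ [c])
      simp [dsplit, glen, hc] at this ⊢
      simpa using this

lemma refAux_of_long (inc : Bool) (pbr recs : List Int) (h : recs.length < pbr.length) :
    refAux inc pbr recs = false := by
  induction pbr generalizing recs with
  | nil => simp at h
  | cons p ps ih =>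
    cases recs with
    | nil => simp [refAux]
    | cons a as =>
      have hps : ps ≠ [] := by
        intro hh; subst hh; simp at h
      simp [refAux, List.isEmpty_iff, hps]
      intro _
      exact ih as (by simpa using Nat.lt_of_succ_lt_succ h)

lemma or_decide (p a : Int) : (decide (p < a) || decide (p = a)) = decide (p ≤ a) := by
  by_cases h1 : p < a <;> by_cases h2 : p = a <;> simp [h1, h2] <;> omega

lemma aLoop_eq (pbr recs : List Int) (inc : Bool) (hlen : pbr.length ≤ recs.length) :
    ∀ (k i : Nat), i + k = pbr.length →
      aLoop pbr recs inc pbr.length i = refAux inc (pbr.drop i) (recs.drop i) := by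
  intro k
  induction k with
  | zero =>
    intro i hi
    rw [aLoop]
    rw [List.drop_of_length_le (show pbr.length ≤ i by omega)]
    simp [show ¬ i < pbr.length by omega, refAux]
  | succ k ih =>
    intro i hi
    have hip : i < pbr.length := by omega
    have hir : i < recs.length := by omega
    have hdp : pbr.drop i = pbr[i] :: pbr.drop (i + 1) := List.drop_eq_getElem_cons hip
    have hdr : recs.drop i = recs[i] :: recs.drop (i + 1) := List.drop_eq_getElem_cons hir
    rw [aLoop]
    simp only [hip, dif_pos, List.getD_eq_getElem _ _ hip, List.getD_eq_getElem _ _ hir]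
    rw [ih (i+1) (by omega), hdp, hdr]
    by_cases hlast : i = pbr.length - 1
    · have hd : pbr.drop (i + 1) = [] := List.drop_of_length_le (by omega)
      rw [hd]
      cases inc <;> simp [refAux, hlast, or_decide]
    · have hne : pbr.drop (i + 1) ≠ [] := by
        intro hh
        have := List.drop_eq_nil_iff.mp hh
        omega
      obtain ⟨q, qs, hqq⟩ := List.exists_cons_of_ne_nil hne
      rw [hqq]
      cases inc <;> simp [refAux, hlast]

-- whether s ends (so far) in a '#': used to justify the trailing-run leniency
def lastHash (cs : List Char) (run : Nat) : Prop :=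
  match cs with
  | [] => run ≠ 0
  | _ :: _ => cs.getLast? = some '#'

lemma glen_ne_nil (cs : List Char) (run : Nat) (h : cs.getLast? = some '#') :
    glen run cs ≠ [] := by
  induction cs generalizing run with
  | nil => simp at h
  | cons c cs ih =>
    cases cs with
    | nil =>
      simp at h; subst h
      simp [glen]
    | cons d ds =>
      have h' : (d :: ds).getLast? = some '#' := by simpa using h
      by_cases hc : c = '.'
      · subst hc
        simp only [glen]
        intro hnil
        exact ih 0 h' (List.append_eq_nil_iff.mp hnil).2
      · simp only [glen, if_neg hc]
        exact ih (run + 1) h'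

lemma altLoop_eq (recs : List Int) (inc : Bool)
    (fin : Option (Nat × Nat) → Bool)
    (hfin : ∀ run i, fin (some (run, i)) =
      (if run ≠ 0 then
        (if recs.length ≤ i then false
         else if inc then decide ((run : Int) ≤ recs.getD i 0)
         else decide ((run : Int) = recs.getD i 0))
       else true))
    (hnone : fin none = false) :
    ∀ (cs : List Char) (run i : Nat), i ≤ recs.length → (inc = true → lastHash cs run) →
      fin (altLoop recs recs.length cs run i) = refAux inc (glen run cs) (recs.drop i) := by
  intro cs
  induction cs with
  | nil =>
    intro run i hi hh
    rw [altLoop, hfin]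
    by_cases hr : run = 0
    · simp [hr, glen, refAux]
    · simp only [glen, ne_eq, hr, not_false_eq_true, if_pos]
      by_cases hie : recs.length ≤ i
      · have hd : recs.drop i = [] := List.drop_of_length_le hie
        simp [hd, refAux, hie]
      · have hir : i < recs.length := by omega
        have hdr : recs.drop i = recs[i] :: recs.drop (i + 1) := List.drop_eq_getElem_cons hir
        have hgd : recs.getD i 0 = recs[i] := by
          simp [List.getD_eq_getElem?_getD, List.getElem?_eq_getElem hir]
        rw [if_neg hie, hgd, hdr]
        cases inc <;> rfl
  | cons c cs ih =>
    intro run i hi hh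
    by_cases hc : c = '.'
    · subst hc
      by_cases hr : run = 0
      · subst hr
        rw [altLoop]
        rw [if_pos rfl, if_neg (show ¬(0 : Nat) ≠ 0 by simp)]
        rw [ih 0 i hi ?_]
        · simp [glen]
        · intro hinc
          have h1 := hh hinc
          simp only [lastHash] at h1 ⊢
          cases cs with
          | nil => simp at h1
          | cons d ds => simpa using h1
      · rw [altLoop]
        rw [if_pos rfl, if_pos hr]
        have hglen : glen run ('.' :: cs) = (run : Int) :: glen 0 cs := by
          simp [glen, hr]
        rw [hglen]
        by_cases hie : recs.length ≤ i
        · rw [if_pos (Or.inl hie), hnone]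
          have hd : recs.drop i = [] := List.drop_of_length_le hie
          rw [hd]
          simp [refAux]
        · have hir : i < recs.length := by omega
          have hdr : recs.drop i = recs[i] :: recs.drop (i + 1) := List.drop_eq_getElem_cons hir
          have hgd : recs.getD i 0 = recs[i] := by
            simp [List.getD_eq_getElem?_getD, List.getElem?_eq_getElem hir]
          rcases hgl : glen 0 cs with _ | ⟨q, qs⟩
          · -- the open run is the last group; the string cannot end in '#' here
            have hinc : inc = false := by
              cases hinc : inc
              · rfl
              · exfalso
                have h1 := hh hinc
                simp only [lastHash] at h1
                cases cs with
                | nil => simp at h1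
                | cons d ds =>
                  exact glen_ne_nil _ 0 (by simpa using h1) hgl
            by_cases he : (run : Int) = recs[i]
            · rw [if_neg (by rw [hgd]; simp [hie, he])]
              rw [ih 0 (i + 1) (by omega) (by simp [hinc]), hgl, hdr]
              simp [refAux, hinc, he]
            · rw [if_pos (Or.inr (by rw [hgd]; exact he)), hnone, hdr]
              simp [refAux, hinc, he]
          · by_cases he : (run : Int) = recs[i]
            · rw [if_neg (by rw [hgd]; simp [hie, he])]
              rw [ih 0 (i + 1) (by omega) ?_, hgl, hdr]
              · simp [refAux, he]
              · intro hinc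
                have h1 := hh hinc
                simp only [lastHash] at h1 ⊢
                cases cs with
                | nil => simp [glen] at hgl
                | cons d ds => simpa using h1
            · rw [if_pos (Or.inr (by rw [hgd]; exact he)), hnone, hdr]
              simp [refAux, he]
    · rw [altLoop]
      simp only [if_neg hc]
      rw [ih (run + 1) i hi ?_]
      · simp [glen, hc]
      · intro hinc
        have h1 := hh hinc
        cases cs with
        | nil => simp [lastHash] at h1 ⊢
        | cons d ds => simpa [lastHash] using h1

lemma endswith_lastHash (s : String) (h : PySem.Str.endswith s "#" = true) :
    lastHash s.toList 0 := by
  rw [PySem.Str.endswith_eq] at h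
  have hs := (PySem.Chars.endswith_iff _ _).mp h
  obtain ⟨t, ht⟩ := hs
  cases hcs : s.toList with
  | nil => rw [hcs] at ht; simp at ht
  | cons c cs =>
    simp only [lastHash]
    rw [← hcs, ← ht]
    exact List.getLast?_concat

lemma alt_eq_refAux (s : String) (recs : List Int) :
    is_possible_arrangement_alt s recs
      = refAux (PySem.Str.endswith s "#") (glen 0 s.toList) recs := by
  unfold is_possible_arrangement_alt
  rw [altLoop_eq recs (PySem.Str.endswith s "#")
      (fun st => match st with
        | none => false
        | some (run, i) =>
          if run ≠ 0 then
            if recs.length ≤ i then false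
            else if PySem.Str.endswith s "#" then decide ((run : Int) ≤ recs.getD i 0)
            else decide ((run : Int) = recs.getD i 0)
          else true)
      (fun _ _ => rfl) rfl s.toList 0 0 (by omega)
      (fun hinc => endswith_lastHash s hinc), List.drop_zero]

lemma ofList_ne_empty_iff (g : List Char) : (decide (String.ofList g ≠ "")) = !g.isEmpty := by
  by_cases hg : g = []
  · subst hg; simp
  · have h1 : String.ofList g ≠ "" := by
      intro he
      have := congrArg String.toList he
      simp at this
      exact hg this
    simp [h1, hg]

lemma a_eq_refAux (s : String) (recs : List Int) :
    is_possible_arrangement s recs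
      = refAux (PySem.Str.endswith s "#") (glen 0 s.toList) recs := by
  simp only [is_possible_arrangement]
  have hsplit : (PySem.Str.split? s ".").getD []
      = (dsplit [] s.toList).map String.ofList := by
    simp [PySem.Str.split?, PySem.Chars.split?, splitOn_eq_dsplit]
  rw [hsplit]
  have hpbr : ((((dsplit [] s.toList).map String.ofList).filter (fun g => decide (g ≠ ""))).map
        (fun g => PySem.Str.len g))
      = glen 0 s.toList := by
    rw [List.filter_map, List.map_map]
    have h1 : ((fun g => decide (g ≠ "")) ∘ String.ofList) = fun g : List Char => !g.isEmpty := by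
      funext g; exact ofList_ne_empty_iff g
    rw [h1]
    have h2 : ((fun g => PySem.Str.len g) ∘ String.ofList)
        = fun g : List Char => ((g.length : Int)) := by
      funext g; simp [PySem.Str.len]
    rw [h2]
    simpa using glen_of_dsplit [] s.toList
  rw [hpbr]
  by_cases hlen : (glen 0 s.toList).length > recs.length
  · rw [if_pos hlen, refAux_of_long _ _ _ hlen]
  · rw [if_neg hlen]
    have := aLoop_eq (glen 0 s.toList) recs (PySem.Str.endswith s "#") (by omega)
      (glen 0 s.toList).length 0 (by omega)
    simpa using this

-- ===== VERDICT (by name: the statement is the Claim_ definition above) =====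
theorem is_possible_arrangement_spec : Claim_equal_is_possible_arrangement := by
  intro s recs _
  unfold Spec_is_possible_arrangement
  rw [a_eq_refAux, alt_eq_refAux]
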